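-- pv_equiv track=rewrite | github.com/Valtarx/wide_nets | hamming.py | calculateControlBits
-- ===== SOURCE A (Python) =====
-- def changeChar(string, position, value):
--     s = list(string)
--     s[position] = value
--     s = ''.join(s)
--
--     return s
--
-- def calculateControlBits(data, controlBitsNumber):
--
--     for i in range(controlBitsNumber):
--         position = 2 ** i - 1
--         t = ''
--
--         for j in range(position, len(data), (position + 1) * 2):
--             t = t + data[j:j + position + 1]
--         t = t.replace('0', '')
--         if len(t) % 2 == 1:
--             data = changeChar(data, position, '1')
--
--     data += str(len(data.replace('0', '')) % 2)
--
--     return data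
-- ===== SOURCE B (Python) =====
-- def calculateControlBits(data, controlBitsNumber):
--     # One pass over the data distributes each non-'0' character to the parity
--     # counters of the set bits of its 1-based index; then the parity bits are
--     # written and the overall parity is appended.
--     chars = list(data)
--     counts = {}
--     for p, ch in enumerate(chars):
--         if ch != '0':
--             idx = p + 1
--             i = 0
--             while idx > 0:
--                 if idx % 2 == 1:
--                     counts[i] = counts.get(i, 0) + 1
--                 idx //= 2
--                 i += 1
--     for i in range(controlBitsNumber):
--         if counts.get(i, 0) % 2 == 1:
--             chars[2 ** i - 1] = '1'
--     parity = sum(1 for ch in chars if ch != '0') % 2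
--     return ''.join(chars) + str(parity)
-- ===== Notes on version B (the rewrite author's own statement) =====
-- stated objective: faster
-- what changed: A scans the string once per control bit, concatenating the bit's index blocks with repeated string concatenation and counting via str.replace; B makes a single pass over the characters, distributing each non-'0' character to the counters of the set bits of its 1-based index, then writes the parity bits and appends the overall parity.
import Mathlib
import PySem

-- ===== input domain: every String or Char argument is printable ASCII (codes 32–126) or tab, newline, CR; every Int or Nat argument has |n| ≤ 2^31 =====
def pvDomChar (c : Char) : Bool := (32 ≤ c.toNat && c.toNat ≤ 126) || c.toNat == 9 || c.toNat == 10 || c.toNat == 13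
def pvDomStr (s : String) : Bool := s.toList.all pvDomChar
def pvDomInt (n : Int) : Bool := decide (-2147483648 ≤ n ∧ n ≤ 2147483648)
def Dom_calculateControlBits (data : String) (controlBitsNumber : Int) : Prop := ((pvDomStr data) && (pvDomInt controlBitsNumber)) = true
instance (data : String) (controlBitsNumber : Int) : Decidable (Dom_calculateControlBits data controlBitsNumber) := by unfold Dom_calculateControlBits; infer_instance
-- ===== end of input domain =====

-- B replaces A's per-control-bit block scans by a single pass that distributes each
-- character to the counters of the set bits of its index (alternative decomposition).


-- ===== PORT A =====
-- s = list(string); s[position] = value; ''.join(s)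
-- (List.set is exact for 0 ≤ position < len(string), the only calls A ever makes)
def changeChar (string : String) (position : Int) (value : String) : String :=
  PySem.Str.join "" ((string.toList.map (fun c => String.ofList [c])).set position.toNat value)

def calculateControlBits (data : String) (controlBitsNumber : Int) : String :=
  let data := (PySem.List.pyRange 0 controlBitsNumber 1).foldl (fun data i =>
    let position : Int := 2 ^ i.toNat - 1        -- 2 ** i  (i ≥ 0 along range(controlBitsNumber))
    let t := (PySem.List.pyRange position (PySem.Str.len data) ((position + 1) * 2)).foldl
      (fun t j => t ++ PySem.Str.slice data (some j) (some (j + position + 1))) ""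
    let t := PySem.Str.replace t "0" ""
    if PySem.Int.mod (PySem.Str.len t) 2 == 1 then changeChar data position "1" else data) data
  data ++ PySem.Int.toStr (PySem.Int.mod (PySem.Str.len (PySem.Str.replace data "0" "")) 2)

-- ===== PORT B =====
-- the inner while loop of B: add 1 to counts[i+bit] for every set bit of idx
def pvAddBits (counts : PySem.Dict Nat Nat) (idx i : Nat) : PySem.Dict Nat Nat :=
  if h : 0 < idx then
    pvAddBits (if idx % 2 == 1 then counts.insert i (counts.getD i 0 + 1) else counts) (idx / 2) (i + 1)
  else counts
termination_by idx
decreasing_by exact Nat.div_lt_self h (by norm_num)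

def calculateControlBits_alt (data : String) (controlBitsNumber : Int) : String :=
  let chars := data.toList
  let counts := (PySem.List.enumerate chars).foldl
    (fun counts pc => if pc.2 != '0' then pvAddBits counts (pc.1.toNat + 1) 0 else counts)
    PySem.Dict.empty
  let chars := (PySem.List.pyRange 0 controlBitsNumber 1).foldl
    (fun chars i => if (counts.getD i.toNat 0) % 2 == 1 then chars.set (2 ^ i.toNat - 1) '1' else chars)
    chars
  -- sum(1 for ch in chars if ch != '0') is the count of non-'0' characters
  let parity : Int := PySem.Int.mod (chars.countP (fun ch => ch != '0') : Int) 2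
  String.ofList chars ++ PySem.Int.toStr parity

-- ===== PRECONDITION & SPEC =====
def Spec_calculateControlBits (data : String) (controlBitsNumber : Int) (out : String) : Prop := out = calculateControlBits_alt data controlBitsNumber
instance (data : String) (controlBitsNumber : Int) (out : String) : Decidable (Spec_calculateControlBits data controlBitsNumber out) := by unfold Spec_calculateControlBits; infer_instance

-- ===== CLAIM (what is proved, stated in full; the proofs are below) =====
def Claim_equal_calculateControlBits : Prop := ∀ (data : String) (controlBitsNumber : Int), Dom_calculateControlBits data controlBitsNumber → Spec_calculateControlBits data controlBitsNumber (calculateControlBits data controlBitsNumber)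

-- ===== LEMMAS AND PROOFS =====

def pvNz (c : Char) : Bool := c != '0'

def pvS (l : List Char) (i : Nat) : Nat :=
  (List.range l.length).countP (fun p => (p+1).testBit i && pvNz (l.getD p '0'))

def pvG (l : List Char) (m : Nat) : List Char :=
  (List.range m).foldl (fun ch i => if pvS l i % 2 == 1 then ch.set (2^i - 1) '1' else ch) l

lemma pvCnt0 {α : Type} (l : List α) (f : α → Bool) (d : α) :
    l.countP f = (List.range l.length).countP (fun p => f (l.getD p d)) := by
  induction l with
  | nil => simp
  | cons x t ih =>
    simp only [List.countP_cons, List.length_cons, List.range_succ_eq_map,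
      List.countP_map, List.getD_cons_zero, List.getD_cons_succ, Function.comp]
    have e : (List.range t.length).countP ((fun p => f ((x :: t).getD p d)) ∘ Nat.succ)
        = (List.range t.length).countP (fun p => f (t.getD p d)) :=
      List.countP_congr (fun p _ => by simp [Function.comp])
    rw [ih, ← e]

lemma pvCountP_or {α : Type} (l : List α) (a b : α → Bool)
    (h : ∀ x ∈ l, ¬(a x = true ∧ b x = true)) :
    l.countP (fun x => a x || b x) = l.countP a + l.countP b := by
  induction l with
  | nil => simp
  | cons x t ih =>
    have hx := h x (by simp)
    have ht : ∀ y ∈ t, ¬(a y = true ∧ b y = true) := fun y hy => h y (by simp [hy])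
    simp only [List.countP_cons, ih ht]
    cases ha : a x <;> cases hb : b x <;> simp_all <;> omega

lemma pvRangeExt (a b : Nat) (h : a ≤ b) (g : Nat → Bool) :
    (List.range b).countP (fun p => decide (p < a) && g p) = (List.range a).countP g := by
  have hb : b = a + (b - a) := by omega
  rw [hb, List.range_add, List.countP_append, List.countP_map]
  have h1 : (List.range a).countP (fun p => decide (p < a) && g p) = (List.range a).countP g := by
    apply List.countP_congr
    intro p hp
    simp at hp
    simp [hp]
  have h2 : (List.range (b-a)).countP ((fun p => decide (p < a) && g p) ∘ (a + ·)) = 0 := by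
    rw [List.countP_eq_zero]
    intro p hp
    simp [Function.comp]
  rw [h1]
  simp only [Function.comp] at h2 ⊢
  omega

lemma pvCntSeg (l : List Char) (j k : Nat) :
    ((l.drop j).take k).countP pvNz
      = (List.range l.length).countP (fun p => decide (j ≤ p) && decide (p < j + k) && pvNz (l.getD p '0')) := by
  by_cases hj : j ≤ l.length
  · rw [pvCnt0 _ _ '0']
    have hlen : ((l.drop j).take k).length = min k (l.length - j) := by simp
    have e1 : (List.range ((l.drop j).take k).length).countP (fun p => pvNz (((l.drop j).take k).getD p '0'))
        = (List.range (min k (l.length - j))).countP (fun p => pvNz (l.getD (j + p) '0')) := by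
      rw [hlen]
      apply List.countP_congr
      intro p hp
      simp only [List.mem_range] at hp
      have : (((l.drop j).take k).getD p '0') = l.getD (j + p) '0' := by
        rw [List.getD_eq_getElem?_getD, List.getD_eq_getElem?_getD, List.getElem?_take,
          List.getElem?_drop]
        simp [show p < k by omega]
      rw [this]
    rw [e1]
    have e2 : (List.range (min k (l.length - j))).countP (fun p => pvNz (l.getD (j + p) '0'))
        = (List.range (l.length - j)).countP (fun p => decide (p < k) && pvNz (l.getD (j + p) '0')) := by
      rcases Nat.lt_or_ge (l.length - j) k with h | h
      · rw [min_eq_right (by omega)]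
        apply List.countP_congr
        intro p hp
        simp only [List.mem_range] at hp
        simp [show p < k by omega]
      · rw [min_eq_left h, ← pvRangeExt k (l.length - j) h]
    rw [e2]
    have hsplit : l.length = j + (l.length - j) := by omega
    conv_rhs => rw [hsplit, List.range_add, List.countP_append, List.countP_map]
    have h0 : (List.range j).countP (fun p => decide (j ≤ p) && decide (p < j + k) && pvNz (l.getD p '0')) = 0 := by
      rw [List.countP_eq_zero]
      intro p hp
      simp only [List.mem_range] at hp
      simp [show ¬ (j ≤ p) by omega]
    have h1 : (List.range (l.length - j)).countP
          ((fun p => decide (j ≤ p) && decide (p < j + k) && pvNz (l.getD p '0')) ∘ (j + ·))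
        = (List.range (l.length - j)).countP (fun p => decide (p < k) && pvNz (l.getD (j + p) '0')) := by
      apply List.countP_congr
      intro p hp
      simp [Function.comp, show j ≤ j + p by omega]
    rw [h0, h1]
    omega
  · have h1 : l.drop j = [] := by simp; omega
    rw [h1]
    simp only [List.take_nil, List.countP_nil]
    symm
    rw [List.countP_eq_zero]
    intro p hp
    simp only [List.mem_range] at hp
    simp [show ¬ (j ≤ p) by omega]

lemma pvTbChar (i j p : Nat) (hj : (j+1) % 2^(i+1) = 2^i) (h1 : j ≤ p) (h2 : p < j + 2^(i+1)) :
    (p+1).testBit i = decide (p < j + 2^i) := by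
  have h2i : 0 < 2^i := Nat.two_pow_pos i
  have hstep : 2^(i+1) = 2^i * 2 := by rw [pow_succ]
  obtain ⟨q, hjq⟩ : ∃ q, j + 1 = 2^(i+1) * q + 2^i :=
    ⟨(j+1)/2^(i+1), by have := Nat.div_add_mod (j+1) (2^(i+1)); omega⟩
  have hd : p = j + (p - j) := by omega
  set d := p - j with hdd
  rw [Nat.testBit_eq_decide_div_mod_eq]
  rcases Nat.lt_or_ge d (2^i) with hlt | hge
  · have e1 : p + 1 = 2^i * (2*q+1) + d := by
      have hp : p + 1 = (j+1) + d := by omega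
      rw [hp, hjq, hstep]; ring
    rw [e1, Nat.mul_add_div h2i, Nat.div_eq_of_lt hlt]
    have : (2*q+1+0) % 2 = 1 := by omega
    rw [this]
    simp
    omega
  · obtain ⟨e, he, helt⟩ : ∃ e, d = 2^i + e ∧ e < 2^i := ⟨d - 2^i, by omega, by omega⟩
    have e1 : p + 1 = 2^i * (2*q+2) + e := by
      have hp : p + 1 = (j+1) + d := by omega
      rw [hp, hjq, hstep, he]
      ring
    rw [e1, Nat.mul_add_div h2i, Nat.div_eq_of_lt helt]
    have : (2*q+2+0) % 2 = 0 := by omega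
    rw [this]
    simp
    omega

lemma pvWindows (l : List Char) (i : Nat) (K j : Nat) (hj : (j+1) % 2^(i+1) = 2^i) :
    ((List.range K).map (fun k => ((l.drop (j + 2^(i+1)*k)).take (2^i)).countP pvNz)).sum
      = (List.range l.length).countP
          (fun p => decide (j ≤ p) && decide (p < j + 2^(i+1)*K) && ((p+1).testBit i && pvNz (l.getD p '0'))) := by
  have h2i : 0 < 2^i := Nat.two_pow_pos i
  have hstep : 2^(i+1) = 2^i * 2 := by rw [pow_succ]
  induction K with
  | zero =>
    symm
    simp only [List.range_zero, List.map_nil, List.sum_nil]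
    rw [List.countP_eq_zero]
    intro p hp
    simp only [List.mem_range] at hp
    have : ¬(j ≤ p ∧ p < j + 2^(i+1)*0) := by omega
    by_cases hA : j ≤ p <;> by_cases hB : p < j + 2^(i+1)*0 <;> simp [hA, hB] <;> omega
  | succ K ih =>
    have hKs : 2^(i+1)*(K+1) = 2^(i+1)*K + 2^(i+1) := by ring
    rw [List.range_succ, List.map_append, List.sum_append]
    simp only [List.map_cons, List.map_nil, List.sum_cons, List.sum_nil, Nat.add_zero]
    rw [ih, pvCntSeg]
    -- window K: its interval count equals the testBit-filtered count over the window
    have hwin : (List.range l.length).countP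
          (fun p => decide (j + 2^(i+1)*K ≤ p) && decide (p < j + 2^(i+1)*K + 2^i) && pvNz (l.getD p '0'))
        = (List.range l.length).countP
          (fun p => decide (j + 2^(i+1)*K ≤ p) && decide (p < j + 2^(i+1)*(K+1)) && ((p+1).testBit i && pvNz (l.getD p '0'))) := by
      apply List.countP_congr
      intro p hp
      by_cases hin : j + 2^(i+1)*K ≤ p ∧ p < j + 2^(i+1)*(K+1)
      · have htb : (p+1).testBit i = decide (p < (j + 2^(i+1)*K) + 2^i) := by
          apply pvTbChar i (j + 2^(i+1)*K) p
          · rw [Nat.add_right_comm j (2^(i+1)*K) 1, Nat.add_mul_mod_self_left]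
            exact hj
          · omega
          · omega
        rw [htb]
        by_cases hlt : p < j + 2^(i+1)*K + 2^i <;> simp [hlt] <;> omega
      · rcases not_and_or.mp hin with h | h
        · simp [show (decide (j + 2^(i+1)*K ≤ p)) = false by simp; omega]
        · simp [show (decide (p < j + 2^(i+1)*K + 2^i)) = false by simp; omega,
                show (decide (p < j + 2^(i+1)*(K+1))) = false by simp; omega]
    rw [hwin]
    -- disjoint union of [j, j+step*K) and [j+step*K, j+step*(K+1))
    rw [← pvCountP_or]
    · apply List.countP_congr
      intro p hp
      by_cases hA : j ≤ p <;> by_cases hB : p < j + 2^(i+1)*(K+1) <;> by_cases hC : p < j + 2^(i+1)*K <;>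
        by_cases hD : j + 2^(i+1)*K ≤ p <;>
        simp_all <;> omega
    · intro p hp
      rintro ⟨hA, hB⟩
      simp only [Bool.and_eq_true, decide_eq_true_eq] at hA hB
      omega

lemma pvTb_ge (i x : Nat) (h : x.testBit i = true) : 2^i ≤ x := by
  by_contra hlt
  rw [Nat.testBit_eq_false_of_lt (by omega)] at h
  exact Bool.false_ne_true h

lemma pvPart (l : List Char) (i : Nat) :
    ((PySem.List.pyRange ((2^i - 1 : Nat) : Int) ((l.length : Nat) : Int) ((2^(i+1) : Nat) : Int)).map
       (fun j => (PySem.List.slice l (some j) (some (j + ((2^i : Nat) : Int)))).countP pvNz)).sum = pvS l i := by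
  have h2i : 0 < 2^i := Nat.two_pow_pos i
  have hstep : 2^(i+1) = 2^i * 2 := by rw [pow_succ]
  have hspos : (0 : Int) < ((2^(i+1) : Nat) : Int) := by positivity
  rw [PySem.List.pyRange_of_pos _ _ hspos, List.map_map]
  set K := (if ((2^i - 1 : Nat) : Int) < ((l.length : Nat) : Int) then
      ((((l.length : Nat) : Int) - ((2^i - 1 : Nat) : Int) + ((2^(i+1) : Nat) : Int) - 1) / ((2^(i+1) : Nat) : Int)).toNat
    else 0) with hK
  have hmap : ∀ k : Nat,
      ((fun j => (PySem.List.slice l (some j) (some (j + ((2^i : Nat) : Int)))).countP pvNz) ∘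
        (fun k => ((2^i - 1 : Nat) : Int) + ((2^(i+1) : Nat) : Int) * (k : Nat))) k
      = ((l.drop ((2^i - 1) + 2^(i+1)*k)).take (2^i)).countP pvNz := by
    intro k
    simp only [Function.comp]
    have e1 : ((2^i - 1 : Nat) : Int) + ((2^(i+1) : Nat) : Int) * (k : Nat)
        = (((2^i - 1) + 2^(i+1)*k : Nat) : Int) := by push_cast; ring
    have e2 : ((2^i - 1 : Nat) : Int) + ((2^(i+1) : Nat) : Int) * (k : Nat) + ((2^i : Nat) : Int)
        = (((2^i - 1) + 2^(i+1)*k : Nat) : Int) + ((2^i : Nat) : Int) := by rw [e1]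
    rw [e2, e1, PySem.List.slice_natCast_add]
  rw [List.map_congr_left (fun k _ => hmap k)]
  have hj : ((2^i - 1) + 1) % 2^(i+1) = 2^i := by
    have : (2^i - 1) + 1 = 2^i := by omega
    rw [this, Nat.mod_eq_of_lt (by omega)]
  rw [pvWindows l i K (2^i - 1) hj]
  unfold pvS
  by_cases hbr : ((2^i - 1 : Nat) : Int) < ((l.length : Nat) : Int)
  · have hlt : 2^i - 1 < l.length := by exact_mod_cast hbr
    have hKval : K = ((l.length - (2^i - 1) + 2^(i+1) - 1) / 2^(i+1) : Nat) := by
      rw [hK, if_pos hbr]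
      have e : (((l.length : Nat) : Int) - ((2^i - 1 : Nat) : Int) + ((2^(i+1) : Nat) : Int) - 1)
          = (((l.length - (2^i - 1) + 2^(i+1) - 1 : Nat)) : Int) := by omega
      rw [e]
      rfl
    have hKbig : l.length ≤ (2^i - 1) + 2^(i+1)*K := by
      set a := l.length - (2^i - 1) + 2^(i+1) - 1 with ha
      have hdm := Nat.div_add_mod a (2^(i+1))
      have hm : a % 2^(i+1) < 2^(i+1) := Nat.mod_lt _ (by omega)
      rw [hKval]
      omega
    apply List.countP_congr
    intro p hp
    simp only [List.mem_range] at hp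
    by_cases htb : (p+1).testBit i = true
    · have hge : 2^i ≤ p + 1 := pvTb_ge i (p+1) htb
      simp [htb, show 2^i - 1 ≤ p by omega, show p < 2^i - 1 + 2^(i+1)*K by omega]
    · simp only [Bool.not_eq_true] at htb
      simp [htb]
  · have hnl : l.length ≤ 2^i - 1 := by
      have := not_lt.mp hbr
      exact_mod_cast this
    apply List.countP_congr
    intro p hp
    simp only [List.mem_range] at hp
    have : (p+1).testBit i = false := Nat.testBit_eq_false_of_lt (by omega)
    simp [this]

lemma pvReplaceGo (fuel : Nat) : ∀ (l acc : List Char), l.length ≤ fuel →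
    PySem.Chars.replace.go ['0'] [] fuel l acc = acc.reverse ++ l.filter pvNz := by
  induction fuel with
  | zero =>
    intro l acc h
    have : l = [] := List.eq_nil_of_length_eq_zero (by omega)
    subst this
    simp [PySem.Chars.replace.go]
  | succ fuel ih =>
    intro l acc h
    cases l with
    | nil => simp [PySem.Chars.replace.go]
    | cons c t =>
      rw [PySem.Chars.replace.go]
      by_cases hc : c = '0'
      · subst hc
        have hpre : ['0'].isPrefixOf ('0' :: t) = true := by simp [List.isPrefixOf]
        simp only [List.length_cons] at h
        rw [if_pos hpre, ih _ _ (by simp; omega)]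
        simp [pvNz, List.filter_cons]
      · have hpre : ['0'].isPrefixOf (c :: t) = false := by
          simp [List.isPrefixOf]
          exact fun hh => hc hh.symm
        rw [if_neg (by simp [hpre])]
        simp only [List.length_cons] at h
        rw [ih t (c :: acc) (by omega)]
        simp [pvNz, List.filter_cons, hc]

lemma pvReplaceFilter (l : List Char) : PySem.Chars.replace l ['0'] [] = l.filter pvNz := by
  rw [PySem.Chars.replace]
  simp only [List.isEmpty_cons, if_false]
  rw [pvReplaceGo l.length l [] (le_refl _)]
  simp

lemma pvReplaceLen (s : String) :
    PySem.Str.len (PySem.Str.replace s "0" "") = (s.toList.countP pvNz : Int) := by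
  rw [PySem.Str.len_eq, PySem.Str.toList_replace, show PySem.Chars.replace s.toList "0".toList "".toList = s.toList.filter pvNz from by
    have : ("0".toList) = ['0'] := rfl
    rw [this, show ("".toList) = ([] : List Char) from rfl, pvReplaceFilter], List.countP_eq_length_filter]

lemma pvFoldStr (js : List Int) (g : Int → String) (t0 : String) :
    (js.foldl (fun t j => t ++ g j) t0).toList = t0.toList ++ js.flatMap (fun j => (g j).toList) := by
  induction js generalizing t0 with
  | nil => simp
  | cons j t ih =>
    simp only [List.foldl_cons, List.flatMap_cons, ih, String.toList_append]
    simp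

lemma pvS_set (l : List Char) (i jx : Nat) (hne : jx ≠ i) :
    pvS (l.set (2^jx - 1) '1') i = pvS l i := by
  unfold pvS
  rw [List.length_set]
  apply List.countP_congr
  intro p hp
  simp only [List.mem_range] at hp
  by_cases hpj : p = 2^jx - 1
  · subst hpj
    have : (2^jx - 1 + 1).testBit i = false := by
      have h1 : 2^jx - 1 + 1 = 2^jx := by have := Nat.two_pow_pos jx; omega
      rw [h1, Nat.testBit_two_pow]
      simp [hne]
    simp [this]
  · have : (l.set (2^jx - 1) '1').getD p '0' = l.getD p '0' := by
      rw [List.getD_eq_getElem?_getD, List.getD_eq_getElem?_getD, List.getElem?_set]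
      simp [show ¬(2^jx - 1 = p) from fun h => hpj h.symm]
    rw [this]

lemma pvS_G (l : List Char) (m i : Nat) (h : m ≤ i) : pvS (pvG l m) i = pvS l i := by
  induction m with
  | zero => simp [pvG]
  | succ m ih =>
    unfold pvG
    rw [List.range_succ, List.foldl_append]
    simp only [List.foldl_cons, List.foldl_nil]
    have hG : (List.range m).foldl (fun ch i => if pvS l i % 2 == 1 then ch.set (2^i - 1) '1' else ch) l = pvG l m := rfl
    rw [hG]
    have hrest := ih (by omega)
    split
    · rw [pvS_set (pvG l m) i m (by omega), hrest]
    · exact hrest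

lemma pvPos_lt (l : List Char) (i : Nat) (h : pvS l i % 2 = 1) : 2^i - 1 < l.length := by
  by_contra hge
  have : pvS l i = 0 := by
    unfold pvS
    rw [List.countP_eq_zero]
    intro p hp
    simp only [List.mem_range] at hp
    have h2i := Nat.two_pow_pos i
    have : (p+1).testBit i = false := Nat.testBit_eq_false_of_lt (by omega)
    simp [this]
  omega

lemma pvChangeChar_toList (s : String) (p : Nat) (_hp : p < s.toList.length) :
    (changeChar s (p : Int) "1").toList = s.toList.set p '1' := by
  unfold changeChar
  rw [PySem.Str.toList_join]
  have h1 : (((s.toList.map (fun c => String.ofList [c])).set (Int.toNat p) "1").map String.toList)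
      = (s.toList.map (fun c => [c])).set p ['1'] := by
    rw [List.map_set, List.map_map]
    have e1 : s.toList.map (String.toList ∘ fun c => String.ofList [c]) = s.toList.map (fun c => [c]) :=
      List.map_congr_left (fun c _ => show (String.toList ∘ fun c => String.ofList [c]) c = [c] by
        simp [Function.comp])
    rw [e1]
    congr 1
  rw [h1]
  have h2 : (s.toList.map (fun c => [c])).set p ['1'] = (s.toList.set p '1').map (fun c => [c]) := by
    rw [List.map_set]
  rw [h2]
  have : ("".toList) = ([] : List Char) := rfl
  rw [this, PySem.Chars.join_nil_singletons]

lemma pvAddBits_getD (idx : Nat) : ∀ (c : PySem.Dict Nat Nat) (k m : Nat),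
    (pvAddBits c idx k).getD m 0 = c.getD m 0 + (if k ≤ m ∧ idx.testBit (m - k) = true then 1 else 0) := by
  induction idx using Nat.strong_induction_on with
  | _ idx ih =>
    intro c k m
    rw [pvAddBits]
    by_cases h : 0 < idx
    · rw [dif_pos h, ih (idx/2) (Nat.div_lt_self h (by norm_num)) _ (k+1) m]
      by_cases hkm : k ≤ m
      · by_cases hk : m = k
        · subst hk
          have ht : idx.testBit (m - m) = decide (idx % 2 = 1) := by
            simp [Nat.testBit_zero]
          rw [ht]
          have hno : ¬ (m + 1 ≤ m) := by omega
          simp only [hno, false_and, if_false, Nat.add_zero]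
          by_cases hpar : idx % 2 = 1
          · rw [if_pos (by simpa using hpar), PySem.Dict.getD_insert]
            simp [hpar]
          · rw [if_neg (by simpa using hpar)]
            simp [hpar]
        · have hlt : k + 1 ≤ m := by omega
          have hmk : m - k = (m - (k+1)) + 1 := by omega
          have ht : idx.testBit (m - k) = (idx / 2).testBit (m - (k+1)) := by
            rw [hmk, Nat.testBit_succ]
          have hd : (if idx % 2 == 1 then c.insert k (c.getD k 0 + 1) else c).getD m 0 = c.getD m 0 := by
            split
            · rw [PySem.Dict.getD_insert, if_neg hk]
            · rfl
          rw [hd, ← ht]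
          simp [hkm, hlt]
      · have h1 : ¬ (k + 1 ≤ m) := by omega
        have hd : (if idx % 2 == 1 then c.insert k (c.getD k 0 + 1) else c).getD m 0 = c.getD m 0 := by
          split
          · rw [PySem.Dict.getD_insert, if_neg (by omega)]
          · rfl
        rw [hd]
        simp [hkm, h1]
    · rw [dif_neg h]
      have : idx = 0 := by omega
      subst this
      simp [Nat.zero_testBit]

lemma pvCounts (l : List Char) (i : Nat) :
    ((PySem.List.enumerate l).foldl
        (fun c pc => if pc.2 != '0' then pvAddBits c (pc.1.toNat + 1) 0 else c)
        PySem.Dict.empty).getD i 0 = pvS l i := by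
  induction l using List.reverseRecOn with
  | nil => simp [PySem.List.enumerate, pvS, PySem.Dict.getD_empty]
  | append_singleton l x ih =>
    rw [PySem.List.enumerate_append, List.foldl_append]
    have he : PySem.List.enumerate [x] ((0:Int) + l.length) = [(((l.length : Nat) : Int), x)] := by
      rw [PySem.List.enumerate_cons]
      simp [PySem.List.enumerate_nil]
    rw [he]
    simp only [List.foldl_cons, List.foldl_nil]
    have hS : pvS (l ++ [x]) i = pvS l i + (if (l.length + 1).testBit i ∧ pvNz x = true then 1 else 0) := by
      unfold pvS
      rw [List.length_append, List.length_singleton, List.range_succ, List.countP_append]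
      have h1 : (List.range l.length).countP (fun p => (p+1).testBit i && pvNz ((l ++ [x]).getD p '0'))
          = (List.range l.length).countP (fun p => (p+1).testBit i && pvNz (l.getD p '0')) := by
        apply List.countP_congr
        intro p hp
        simp only [List.mem_range] at hp
        rw [List.getD_eq_getElem?_getD, List.getElem?_append_left hp, ← List.getD_eq_getElem?_getD]
      rw [h1]
      have h2 : (l ++ [x]).getD l.length '0' = x := by
        rw [List.getD_eq_getElem?_getD, List.getElem?_concat_length]
        rfl
      simp only [List.countP_cons, List.countP_nil, h2]
      by_cases ht : (l.length + 1).testBit i <;> by_cases hx : pvNz x = true <;>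
        simp [ht, hx]
    rw [hS, ← ih]
    by_cases hx : x != '0'
    · rw [if_pos hx]
      have : (((l.length : Nat) : Int)).toNat + 1 = l.length + 1 := by simp
      rw [this, pvAddBits_getD]
      have : pvNz x = true := hx
      simp [this]
    · rw [if_neg hx]
      have : pvNz x = false := by simpa [pvNz] using hx
      simp [this]

lemma pvTlen (s : String) (k : Nat) :
    PySem.Str.len (PySem.Str.replace
      ((PySem.List.pyRange ((2:Int)^k - 1) (PySem.Str.len s) (((2:Int)^k - 1 + 1) * 2)).foldl
        (fun t j => t ++ PySem.Str.slice s (some j) (some (j + ((2:Int)^k - 1) + 1))) "") "0" "")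
      = (pvS s.toList k : Int) := by
  have h2k := Nat.two_pow_pos k
  rw [pvReplaceLen, pvFoldStr]
  have hnil : ("".toList) = ([] : List Char) := rfl
  rw [hnil, List.nil_append, List.countP_flatMap]
  have hb1 : (2:Int)^k - 1 = ((2^k - 1 : Nat) : Int) := by
    rw [Nat.cast_sub (by omega : 1 ≤ 2^k)]; push_cast; ring
  have hb2 : PySem.Str.len s = ((s.toList.length : Nat) : Int) := PySem.Str.len_eq s
  rw [hb1, hb2]
  have hb3 : (((2^k - 1 : Nat) : Int) + 1) * 2 = ((2^(k+1) : Nat) : Int) := by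
    rw [Nat.cast_sub (by omega : 1 ≤ 2^k)]; push_cast [pow_succ]; ring
  rw [hb3]
  have hmap : ∀ j ∈ PySem.List.pyRange ((2^k - 1 : Nat) : Int) ((s.toList.length : Nat) : Int) ((2^(k+1) : Nat) : Int),
      ((List.countP pvNz ∘ fun j => (PySem.Str.slice s (some j) (some (j + ((2^k - 1 : Nat) : Int) + 1))).toList)) j
        = (fun j => (PySem.List.slice s.toList (some j) (some (j + ((2^k : Nat) : Int)))).countP pvNz) j := by
    intro j _
    simp only [Function.comp]
    have e : j + ((2^k - 1 : Nat) : Int) + 1 = j + ((2^k : Nat) : Int) := by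
      rw [Nat.cast_sub (by omega : 1 ≤ 2^k)]; push_cast; ring
    rw [e, PySem.Str.toList_slice]
    simp
  rw [List.map_congr_left hmap, pvPart s.toList k]

lemma pvStepA (s : String) (k : Nat) :
    ((fun (data : String) (i : Int) =>
      let position : Int := 2 ^ i.toNat - 1
      let t := (PySem.List.pyRange position (PySem.Str.len data) ((position + 1) * 2)).foldl
        (fun t j => t ++ PySem.Str.slice data (some j) (some (j + position + 1))) ""
      let t := PySem.Str.replace t "0" ""
      if PySem.Int.mod (PySem.Str.len t) 2 == 1 then changeChar data position "1" else data)
        s ((k : Nat) : Int)).toList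
      = if pvS s.toList k % 2 == 1 then s.toList.set (2^k - 1) '1' else s.toList := by
  have h2k := Nat.two_pow_pos k
  dsimp only
  simp only [Int.toNat_natCast]
  rw [pvTlen s k]
  have hc : (PySem.Int.mod ((pvS s.toList k : Nat) : Int) 2 == 1) = (pvS s.toList k % 2 == 1) := by
    rw [PySem.Int.mod_eq_emod_of_pos (by norm_num), Bool.eq_iff_iff]
    simp only [beq_iff_eq]
    omega
  rw [hc]
  by_cases hp : pvS s.toList k % 2 = 1
  · rw [if_pos (by simpa using hp), if_pos (by simpa using hp)]
    have hb1 : (2:Int)^k - 1 = ((2^k - 1 : Nat) : Int) := by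
      rw [Nat.cast_sub (by omega : 1 ≤ 2^k)]; push_cast; ring
    rw [hb1, pvChangeChar_toList s (2^k - 1) (pvPos_lt s.toList k hp)]
  · rw [if_neg (by simpa using hp), if_neg (by simpa using hp)]

lemma pvLoopA (data : String) (m : Nat) :
    (((List.range m).map (fun k => ((k : Nat) : Int))).foldl (fun (s : String) (i : Int) =>
      let position : Int := 2 ^ i.toNat - 1
      let t := (PySem.List.pyRange position (PySem.Str.len s) ((position + 1) * 2)).foldl
        (fun t j => t ++ PySem.Str.slice s (some j) (some (j + position + 1))) ""
      let t := PySem.Str.replace t "0" ""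
      if PySem.Int.mod (PySem.Str.len t) 2 == 1 then changeChar s position "1" else s) data).toList
      = pvG data.toList m := by
  induction m with
  | zero => simp [pvG]
  | succ m ih =>
    rw [List.range_succ, List.map_append, List.foldl_append]
    simp only [List.map_cons, List.map_nil, List.foldl_cons, List.foldl_nil]
    rw [pvStepA _ m, ih, pvS_G data.toList m m (le_refl m)]
    unfold pvG
    rw [List.range_succ, List.foldl_append]
    simp only [List.foldl_cons, List.foldl_nil]

lemma pvLoopB (data : String) (m : Nat)
    (counts : PySem.Dict Nat Nat)
    (hc : ∀ i, counts.getD i 0 = pvS data.toList i) :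
    ((List.range m).map (fun k => ((k : Nat) : Int))).foldl
      (fun (chars : List Char) (i : Int) =>
        if (counts.getD i.toNat 0) % 2 == 1 then chars.set (2 ^ i.toNat - 1) '1' else chars)
      data.toList
      = pvG data.toList m := by
  induction m with
  | zero => simp [pvG]
  | succ m ih =>
    rw [List.range_succ, List.map_append, List.foldl_append]
    simp only [List.map_cons, List.map_nil, List.foldl_cons, List.foldl_nil]
    rw [ih]
    simp only [Int.toNat_natCast, hc m]
    unfold pvG
    rw [List.range_succ, List.foldl_append]
    simp only [List.foldl_cons, List.foldl_nil]

lemma pvAB_eq (data : String) (cbn : Int) :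
    calculateControlBits data cbn = calculateControlBits_alt data cbn := by
  apply String.toList_inj.mp
  unfold calculateControlBits calculateControlBits_alt
  dsimp only
  have hrange : PySem.List.pyRange 0 cbn 1 = (List.range (cbn - 0).toNat).map (fun k => ((k : Nat) : Int)) := by
    rw [PySem.List.pyRange_one]
    exact List.map_congr_left (fun k _ => by omega)
  rw [hrange]
  set M := (cbn - 0).toNat with hM
  have hA := pvLoopA data M
  have hB := pvLoopB data M _ (fun i => pvCounts data.toList i)
  rw [String.toList_append, String.toList_append, hA, String.toList_ofList, hB]
  have hx : PySem.Str.len (PySem.Str.replace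
      ((((List.range M).map (fun k => ((k : Nat) : Int))).foldl (fun (s : String) (i : Int) =>
        let position : Int := 2 ^ i.toNat - 1
        let t := (PySem.List.pyRange position (PySem.Str.len s) ((position + 1) * 2)).foldl
          (fun t j => t ++ PySem.Str.slice s (some j) (some (j + position + 1))) ""
        let t := PySem.Str.replace t "0" ""
        if PySem.Int.mod (PySem.Str.len t) 2 == 1 then changeChar s position "1" else s) data)) "0" "")
      = ((pvG data.toList M).countP (fun ch => ch != '0') : Int) := by
    rw [pvReplaceLen, hA]
    rfl
  rw [hx]

-- ===== VERDICT (by name: the statement is the Claim_ definition above) =====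
theorem calculateControlBits_spec : Claim_equal_calculateControlBits := by
  intro data controlBitsNumber _
  show calculateControlBits data controlBitsNumber = calculateControlBits_alt data controlBitsNumber
  exact pvAB_eq data controlBitsNumber
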